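-- pv_equiv track=rewrite | github.com/LittlePyx/Pi_zaya | kb/converter/quality_compare.py | _strip_display_math_blocks
-- ===== SOURCE A (Python) =====
-- def _strip_display_math_blocks(md_text: str) -> str:
--     lines = md_text.splitlines()
--     out: list[str] = []
--     in_block = False
--     for raw in lines:
--         stripped = (raw or "").strip()
--         if stripped.startswith("$$") and stripped.endswith("$$") and len(stripped) > 4:
--             out.append("")
--             continue
--         if stripped == "$$":
--             in_block = not in_block
--             out.append("")
--             continue
--         if in_block:
--             out.append("")
--             continue
--         out.append(raw)
--     return "\n".join(out)
-- ===== SOURCE B (Python) =====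
-- def _strip_display_math_blocks(md_text: str) -> str:
--     lines = md_text.splitlines()
--     out: list[str] = []
--     i = 0
--     n = len(lines)
--     while i < n:
--         s = lines[i].strip()
--         if s.startswith("$$") and s.endswith("$$") and len(s) > 4:
--             out.append("")
--         elif s == "$$":
--             # opening fence: blank it and consume the whole block
--             out.append("")
--             i += 1
--             while i < n and lines[i].strip() != "$$":
--                 out.append("")
--                 i += 1
--             if i < n:
--                 out.append("")  # closing fence
--         else:
--             out.append(lines[i])
--         i += 1
--     return "\n".join(out)
-- ===== Notes on version B (the rewrite author's own statement) =====
-- stated objective: alternative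
-- what changed: Replaces A's single for-loop with a boolean in_block toggle by an index-driven outer while loop plus an explicit nested inner loop that consumes and blanks an entire $$-delimited block (including an unterminated one) before resuming.
import Mathlib
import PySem

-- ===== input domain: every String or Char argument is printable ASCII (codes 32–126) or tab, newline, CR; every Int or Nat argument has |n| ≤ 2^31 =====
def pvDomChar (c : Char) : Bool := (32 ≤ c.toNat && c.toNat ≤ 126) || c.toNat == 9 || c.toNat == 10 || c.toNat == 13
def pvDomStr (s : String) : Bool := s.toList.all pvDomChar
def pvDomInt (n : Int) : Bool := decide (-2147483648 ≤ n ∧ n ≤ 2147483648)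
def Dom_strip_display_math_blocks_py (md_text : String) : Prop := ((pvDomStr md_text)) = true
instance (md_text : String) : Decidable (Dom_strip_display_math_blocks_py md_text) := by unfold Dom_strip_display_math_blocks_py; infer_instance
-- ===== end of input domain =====

-- B replaces A's boolean in_block toggle by an explicit nested block-consuming loop (alternative decomposition, same cost).

-- ===== PORT A =====
-- for-loop over lines with state (out, in_block)
def strip_display_math_blocks_py (md_text : String) : String :=
  let lines := PySem.Str.splitlines md_text
  let st := lines.foldl (fun (acc : List String × Bool) raw =>
    let stripped := PySem.Str.strip raw
    if PySem.Str.startswith stripped "$$" && PySem.Str.endswith stripped "$$"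
        && decide (4 < PySem.Str.len stripped) then
      (acc.1 ++ [""], acc.2)
    else if stripped == "$$" then
      (acc.1 ++ [""], !acc.2)
    else if acc.2 then
      (acc.1 ++ [""], acc.2)
    else
      (acc.1 ++ [raw], acc.2)) ([], false)
  PySem.Str.join "\n" st.1

-- ===== PORT B =====
-- B's outer while-loop / inner block-consuming while-loop, as mutual structural recursion on the line list
mutual
  def pvAltGo : List String → List String
    | [] => []
    | raw :: rest =>
      let s := PySem.Str.strip raw
      if PySem.Str.startswith s "$$" && PySem.Str.endswith s "$$"
          && decide (4 < PySem.Str.len s) then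
        "" :: pvAltGo rest
      else if s == "$$" then
        "" :: pvAltConsume rest
      else
        raw :: pvAltGo rest
  -- inner loop: blank every line until the closing bare '$$' (which is also blanked), or the end
  def pvAltConsume : List String → List String
    | [] => []
    | raw :: rest =>
      if PySem.Str.strip raw == "$$" then
        "" :: pvAltGo rest
      else
        "" :: pvAltConsume rest
end

def strip_display_math_blocks_py_alt (md_text : String) : String :=
  PySem.Str.join "\n" (pvAltGo (PySem.Str.splitlines md_text))

-- ===== PRECONDITION & SPEC =====
def Spec_strip_display_math_blocks_py (md_text : String) (out : String) : Prop := out = strip_display_math_blocks_py_alt md_text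
instance (md_text : String) (out : String) : Decidable (Spec_strip_display_math_blocks_py md_text out) := by unfold Spec_strip_display_math_blocks_py; infer_instance

-- ===== CLAIM (what is proved, stated in full; the proofs are below) =====
def Claim_equal_strip_display_math_blocks_py : Prop := ∀ (md_text : String), Dom_strip_display_math_blocks_py md_text → Spec_strip_display_math_blocks_py md_text (strip_display_math_blocks_py md_text)

-- ===== LEMMAS AND PROOFS =====

-- A's loop body, named for the invariant proof
def pvStepA (acc : List String × Bool) (raw : String) : List String × Bool :=
  let stripped := PySem.Str.strip raw
  if PySem.Str.startswith stripped "$$" && PySem.Str.endswith stripped "$$"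
      && decide (4 < PySem.Str.len stripped) then
    (acc.1 ++ [""], acc.2)
  else if stripped == "$$" then
    (acc.1 ++ [""], !acc.2)
  else if acc.2 then
    (acc.1 ++ [""], acc.2)
  else
    (acc.1 ++ [raw], acc.2)

-- an 'inline' line ($$…$$ with len>4) is never the bare fence '$$' (which has length 2)
theorem pv_strip_ne_fence (raw : String)
    (h : 4 < (PySem.Chars.strip raw.toList).length) :
    ¬ PySem.Str.strip raw = "$$" := by
  intro he
  have := congrArg String.toList he
  simp at this
  rw [this] at h
  simp at h

theorem pv_stripc_ne_fence (raw : String)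
    (h : 4 < (PySem.Chars.strip raw.toList).length) :
    ¬ PySem.Chars.strip raw.toList = ['$', '$'] := by
  intro he; rw [he] at h; simp at h

-- invariant: A's fold from (out, b) appends exactly B's go (b = false) / consume (b = true)
theorem pv_fold_eq (lines : List String) : ∀ (out : List String) (b : Bool),
    (lines.foldl pvStepA (out, b)).1
      = out ++ (if b then pvAltConsume lines else pvAltGo lines) := by
  induction lines with
  | nil => intro out b; cases b <;> simp [pvAltGo, pvAltConsume]
  | cons raw rest ih =>
    intro out b
    simp only [List.foldl_cons]
    by_cases hinl : (PySem.Chars.startswith (PySem.Chars.strip raw.toList) ['$', '$'] = true ∧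
        PySem.Chars.endswith (PySem.Chars.strip raw.toList) ['$', '$'] = true) ∧
        4 < (PySem.Chars.strip raw.toList).length
    · have hne1 := pv_strip_ne_fence raw hinl.2
      have hne2 := pv_stripc_ne_fence raw hinl.2
      cases b <;>
        simp [pvStepA, pvAltGo, pvAltConsume, hinl, hne1, ih]
    · by_cases hfence : PySem.Str.strip raw = "$$"
      · cases b <;>
          simp [pvStepA, pvAltGo, pvAltConsume, hfence, ih]
      · cases b <;>
          simp [pvStepA, pvAltGo, pvAltConsume, hinl, hfence, ih]

-- ===== VERDICT (by name: the statement is the Claim_ definition above) =====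
theorem strip_display_math_blocks_py_spec : Claim_equal_strip_display_math_blocks_py := by
  intro md_text _
  unfold Spec_strip_display_math_blocks_py strip_display_math_blocks_py strip_display_math_blocks_py_alt
  have h := pv_fold_eq (PySem.Str.splitlines md_text) [] false
  simp only [if_neg Bool.false_ne_true] at h
  show PySem.Str.join "\n" (List.foldl pvStepA ([], false) (PySem.Str.splitlines md_text)).1 = _
  simp [h]
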